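-- pv_equiv track=rewrite | github.com/AshishSalaskar1/DS_Algo_Playground | Track/DSA_A_to_Z/Dynamic Programming/CN/Partition/Most_Beautiful_Plates.py | solve_tabulation
-- ===== SOURCE A (Python) =====
-- import copy
--
-- def solve_tabulation(arr, k):
--     nr, nc = len(arr), len(arr[0])
--
--     # prefix[i][j] = sum of arr[i][0..j]
--     prefix = copy.deepcopy(arr)
--     for i in range(nr):
--         for j in range(1, len(prefix[i])):
--             prefix[i][j] += prefix[i][j-1]
--
--     # dp[row][plates] = max profit using first `row` rows and taking `plates` plates
--     dp = [[0 for _ in range(k+1)] for _ in range(nr+1)]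
--
--     for row in range(1, nr+1):
--         for plates in range(0, k+1):
--             dp[row][plates] = dp[row-1][plates]  # take 0 from this row
--
--             for take in range(1, min(plates, nc)+1):
--                 dp[row][plates] = max(
--                     dp[row][plates],
--                     prefix[row-1][take-1] + dp[row-1][plates-take]
--                 )
--
--     return dp[-1][-1]
-- ===== SOURCE B (Python) =====
-- def solve_tabulation(arr, k):
--     nr, nc = len(arr), len(arr[0])
--
--     # prefix[i][j] = sum of arr[i][0..j], built as a running sum per row
--     prefix = []
--     for row in arr:
--         run, acc = 0, []
--         for x in row:
--             run += x
--             acc.append(run)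
--         prefix.append(acc)
--
--     # top-down: best(row, plates) = max profit using the first `row` rows with `plates` plates
--     memo = {}
--
--     def best(row, plates):
--         if row == 0:
--             return 0
--         key = (row, plates)
--         if key in memo:
--             return memo[key]
--         res = best(row - 1, plates)
--         for take in range(1, min(plates, nc) + 1):
--             res = max(res, prefix[row - 1][take - 1] + best(row - 1, plates - take))
--         memo[key] = res
--         return res
--
--     return best(nr, k)
-- ===== Notes on version B (the rewrite author's own statement) =====
-- stated objective: alternative
-- what changed: Replaces A's bottom-up (nr+1)x(k+1) DP table (filled row by row with in-place updates) by a memoized top-down recursion best(row, plates) over a dict, which only visits the (row, plates) states actually reachable from (nr, k); the prefix sums are built by a running accumulator instead of in-place mutation.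
import Mathlib
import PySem

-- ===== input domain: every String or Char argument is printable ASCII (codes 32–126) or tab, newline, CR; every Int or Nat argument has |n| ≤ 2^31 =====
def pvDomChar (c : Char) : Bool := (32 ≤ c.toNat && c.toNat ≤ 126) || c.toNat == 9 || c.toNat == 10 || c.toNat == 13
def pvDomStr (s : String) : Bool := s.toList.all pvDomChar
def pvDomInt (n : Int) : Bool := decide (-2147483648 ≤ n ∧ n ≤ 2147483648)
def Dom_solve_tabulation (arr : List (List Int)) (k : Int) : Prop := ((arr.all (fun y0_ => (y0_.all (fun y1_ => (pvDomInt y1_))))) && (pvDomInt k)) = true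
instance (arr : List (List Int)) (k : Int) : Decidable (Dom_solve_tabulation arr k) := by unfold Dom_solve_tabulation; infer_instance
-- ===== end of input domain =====

-- B replaces A's bottom-up (nr+1)×(k+1) table by a memoized top-down recursion over (row, plates),
-- visiting only reachable states; return values agree on all inputs where A returns (Pre_).

-- ===== PORT A =====
-- inner loop 'for j in range(1, len(prefix[i])): prefix[i][j] += prefix[i][j-1]' (in-place on one row)
def pvPrefRowA (r : List Int) : List Int :=
  (PySem.List.pyRange 1 (PySem.List.len r) 1).foldl
    (fun p j => PySem.List.pySetD p j (PySem.List.pyGetD p j 0 + PySem.List.pyGetD p (j - 1) 0)) r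

def solve_tabulation (arr : List (List Int)) (k : Int) : Int :=
  let nr : Int := PySem.List.len arr
  let nc : Int := PySem.List.len ((PySem.List.pyGet? arr 0).getD [])  -- arr[0]; IndexError on [] excluded by Pre_
  -- 'for i in range(nr)' rewrites row i in place: the outer loop is a map of the inner loop over the rows
  let pfx := arr.map pvPrefRowA
  let dp0 := (PySem.List.pyRange 0 (nr + 1) 1).map
    (fun _ => (PySem.List.pyRange 0 (k + 1) 1).map (fun _ => (0 : Int)))
  let dp := (PySem.List.pyRange 1 (nr + 1) 1).foldl (fun dp row =>
    (PySem.List.pyRange 0 (k + 1) 1).foldl (fun dp plates =>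
      -- dp[row][plates] = dp[row-1][plates], then repeatedly maxed in the take-loop
      -- (the cell value is threaded through the take-fold and written once)
      PySem.List.pySetD dp row (PySem.List.pySetD (PySem.List.pyGetD dp row []) plates
        ((PySem.List.pyRange 1 (min plates nc + 1) 1).foldl
          (fun c take =>
            max c (PySem.List.pyGetD (PySem.List.pyGetD pfx (row - 1) []) (take - 1) 0 +
                   PySem.List.pyGetD (PySem.List.pyGetD dp (row - 1) []) (plates - take) 0))
          (PySem.List.pyGetD (PySem.List.pyGetD dp (row - 1) []) plates 0)))) dp) dp0
  PySem.List.pyGetD (PySem.List.pyGetD dp (-1) []) (-1) 0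

-- ===== PORT B =====
-- 'run, acc = 0, []; for x in row: run += x; acc.append(run)'
def pvPrefRowB (r : List Int) : List Int :=
  (r.foldl (fun (st : Int × List Int) x => (st.1 + x, st.2 ++ [st.1 + x])) ((0 : Int), ([] : List Int))).2

-- memoized best(row, plates); the memo dict is threaded through
def pvBest (pref : List (List Int)) (nc : Int) :
    Nat → Int → PySem.Dict (Int × Int) Int → Int × PySem.Dict (Int × Int) Int
  | 0 => fun _ memo => (0, memo)
  | r + 1 => fun plates memo =>
      let B := pvBest pref nc r
      match memo.get? (((r : Int) + 1, plates)) with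
      | some v => (v, memo)
      | none =>
        let s0 := B plates memo
        let s := (PySem.List.pyRange 1 (min plates nc + 1) 1).foldl
          (fun (s : Int × PySem.Dict (Int × Int) Int) take =>
            let w := B (plates - take) s.2
            (max s.1 (PySem.List.pyGetD (PySem.List.pyGetD pref (r : Int) []) (take - 1) 0 + w.1),
             w.2)) s0
        (s.1, s.2.insert (((r : Int) + 1, plates)) s.1)

def solve_tabulation_alt (arr : List (List Int)) (k : Int) : Int :=
  let nr : Nat := arr.length
  let nc : Int := PySem.List.len ((PySem.List.pyGet? arr 0).getD [])
  let pfx := arr.map pvPrefRowB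
  (pvBest pfx nc nr k PySem.Dict.empty).1

-- ===== PRECONDITION & SPEC =====
-- Pre_ = exactly the inputs where Python A returns: A raises IndexError on arr == [] (arr[0]),
-- on k < 0 (dp[-1][-1] on an empty row), and on a row shorter than min(k, len(arr[0])) (prefix[row-1][take-1]).
def Pre_solve_tabulation (arr : List (List Int)) (k : Int) : Prop :=
  arr ≠ [] ∧ 0 ≤ k ∧
  ∀ row ∈ arr, min k (PySem.List.len ((PySem.List.pyGet? arr 0).getD [])) ≤ PySem.List.len row
instance (arr : List (List Int)) (k : Int) : Decidable (Pre_solve_tabulation arr k) := by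
  unfold Pre_solve_tabulation; infer_instance
def pvWitness_solve_tabulation : List (List Int) × Int := ([[1, 2], [3, 4]], 2)

def Spec_solve_tabulation (arr : List (List Int)) (k : Int) (out : Int) : Prop := out = solve_tabulation_alt arr k
instance (arr : List (List Int)) (k : Int) (out : Int) : Decidable (Spec_solve_tabulation arr k out) := by unfold Spec_solve_tabulation; infer_instance

-- ===== CLAIM (what is proved, stated in full; the proofs are below) =====
def Claim_equal_solve_tabulation : Prop := ∀ (arr : List (List Int)) (k : Int), Dom_solve_tabulation arr k → Pre_solve_tabulation arr k → Spec_solve_tabulation arr k (solve_tabulation arr k)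

-- ===== LEMMAS AND PROOFS =====

-- the common value: F pref nc row plates = the DP recurrence both programs compute
def pvF (pref : List (List Int)) (nc : Int) : Nat → Int → Int
  | 0 => fun _ => 0
  | r + 1 => fun plates =>
      let prev := pvF pref nc r
      (PySem.List.pyRange 1 (min plates nc + 1) 1).foldl
        (fun c take =>
          max c (PySem.List.pyGetD (PySem.List.pyGetD pref (r : Int) []) (take - 1) 0 +
                 prev (plates - take))) (prev plates)

-- running prefix sums, the value both prefix constructions compute
def pvScan : Int → List Int → List Int
  | _, [] => []
  | s, x :: xs => (s + x) :: pvScan (s + x) xs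

theorem pvScan_length (s : Int) (l : List Int) : (pvScan s l).length = l.length := by
  induction l generalizing s with
  | nil => rfl
  | cons x xs ih => simp [pvScan, ih]

theorem pvScan_append (s : Int) (l1 l2 : List Int) :
    pvScan s (l1 ++ l2) = pvScan s l1 ++ pvScan (s + l1.sum) l2 := by
  induction l1 generalizing s with
  | nil => simp [pvScan]
  | cons x xs ih => simp [pvScan, ih, add_assoc]

theorem pvScan_getElem (s : Int) (l : List Int) (i : Nat) (h : i < l.length) :
    (pvScan s l)[i]'(by rw [pvScan_length]; exact h) = s + (l.take (i + 1)).sum := by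
  induction l generalizing s i with
  | nil => simp at h
  | cons x xs ih =>
    cases i with
    | zero => simp [pvScan]
    | succ j =>
      simp only [pvScan, List.getElem_cons_succ, List.take_succ_cons, List.sum_cons]
      rw [ih (s + x) j (by simpa using h)]
      ring

theorem pvPrefRowB_eq_scan (r : List Int) : pvPrefRowB r = pvScan 0 r := by
  suffices h : ∀ (l : List Int) (s : Int) (acc : List Int),
      (l.foldl (fun (st : Int × List Int) x => (st.1 + x, st.2 ++ [st.1 + x])) (s, acc)).2
        = acc ++ pvScan s l by
    simpa [pvPrefRowB] using h r 0 []
  intro l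
  induction l with
  | nil => intro s acc; simp [pvScan]
  | cons x xs ih => intro s acc; simp [pvScan, ih]

theorem pvScan_last (s : Int) (l : List Int) (h : 0 < l.length) :
    (pvScan s l)[l.length - 1]'(by rw [pvScan_length]; omega) = s + l.sum := by
  have h2 := pvScan_getElem s l (l.length - 1) (by omega)
  rw [Nat.sub_add_cancel h, List.take_of_length_le le_rfl] at h2
  exact h2

theorem pvPrefFoldInv (r : List Int) (j : Nat) (h1 : 1 ≤ j) (h2 : j ≤ r.length) :
    (PySem.List.pyRange 1 (j : Int) 1).foldl
      (fun p i => PySem.List.pySetD p i (PySem.List.pyGetD p i 0 + PySem.List.pyGetD p (i - 1) 0)) r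
      = pvScan 0 (r.take j) ++ r.drop j := by
  induction j with
  | zero => omega
  | succ n ih =>
    rcases Nat.lt_or_ge n 1 with hn | hn
    · -- j = 1: the range is empty and r = scan of its first element ++ rest
      interval_cases n
      rcases r with _ | ⟨x, xs⟩
      · simp at h2
      · simp [PySem.List.pyRange_one_eq_nil, pvScan]
    · have hnr : n < r.length := by omega
      have hcast : ((n + 1 : Nat) : Int) = (n : Int) + 1 := by push_cast; ring
      rw [hcast, PySem.List.pyRange_one_succ_right (by exact_mod_cast hn), List.foldl_append,
        ih hn (by omega)]
      set A := pvScan 0 (r.take n) with hAdef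
      have hA : A.length = n := by
        rw [hAdef, pvScan_length, List.length_take]; omega
      have hdrop : r.drop n = r[n] :: r.drop (n + 1) := List.drop_eq_getElem_cons hnr
      simp only [List.foldl_cons, List.foldl_nil]
      have hget1 : PySem.List.pyGetD (A ++ r.drop n) (n : Int) 0 = r[n] := by
        rw [PySem.List.pyGetD_natCast, hdrop, List.getD_append_right _ _ _ _ (by omega),
          hA, Nat.sub_self]
        rfl
      have hcast2 : (n : Int) - 1 = ((n - 1 : Nat) : Int) := by push_cast [hn]; ring
      have hlen : (r.take n).length = n := by simp; omega
      have hget2 : PySem.List.pyGetD (A ++ r.drop n) ((n : Int) - 1) 0 = 0 + (r.take n).sum := by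
        have h3 := pvScan_last 0 (r.take n) (by omega)
        simp only [hlen] at h3
        rw [hcast2, PySem.List.pyGetD_natCast, List.getD_append _ _ _ _ (by omega),
          List.getD_eq_getElem _ _ (by omega)]
        exact h3
      rw [hget1, hget2, PySem.List.pySetD_natCast, hdrop, List.set_append]
      rw [if_neg (by omega)]
      have htake : r.take (n + 1) = r.take n ++ [r[n]] := by
        rw [List.take_add_one, List.getElem?_eq_getElem hnr]; rfl
      rw [htake, pvScan_append]
      simp only [hA, Nat.sub_self, List.set_cons_zero, pvScan, List.append_assoc,
        List.cons_append, List.nil_append]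
      congr 2
      ring

theorem pvPrefRowA_eq_scan (r : List Int) : pvPrefRowA r = pvScan 0 r := by
  rcases r with _ | ⟨x, xs⟩
  · simp [pvPrefRowA, pvScan, PySem.List.pyRange_one_eq_nil]
  · have h := pvPrefFoldInv (x :: xs) (x :: xs).length (by simp) le_rfl
    simpa [pvPrefRowA] using h

theorem pvBest_correct (pref : List (List Int)) (nc : Int) (r : Nat) (plates : Int)
    (memo : PySem.Dict (Int × Int) Int)
    (hm : ∀ i p v, memo.get? (i, p) = some v → v = pvF pref nc i.toNat p) :
    (pvBest pref nc r plates memo).1 = pvF pref nc r plates ∧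
    ∀ i p v, (pvBest pref nc r plates memo).2.get? (i, p) = some v → v = pvF pref nc i.toNat p := by
  induction r generalizing plates memo with
  | zero => exact ⟨rfl, hm⟩
  | succ n ih =>
    simp only [pvBest]
    cases hget : memo.get? ((n : Int) + 1, plates) with
    | some v =>
      have hv := hm ((n : Int) + 1) plates v hget
      have ht : ((n : Int) + 1).toNat = n + 1 := by omega
      rw [ht] at hv
      exact ⟨hv, hm⟩
    | none =>
      have hfold : ∀ (l : List Int) (s : Int × PySem.Dict (Int × Int) Int),
          (∀ i p v, s.2.get? (i, p) = some v → v = pvF pref nc i.toNat p) →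
          (l.foldl (fun (s : Int × PySem.Dict (Int × Int) Int) take =>
              (max s.1 (PySem.List.pyGetD (PySem.List.pyGetD pref (n : Int) []) (take - 1) 0 +
                 (pvBest pref nc n (plates - take) s.2).1),
               (pvBest pref nc n (plates - take) s.2).2)) s).1
            = l.foldl (fun c take =>
                max c (PySem.List.pyGetD (PySem.List.pyGetD pref (n : Int) []) (take - 1) 0 +
                  pvF pref nc n (plates - take))) s.1 ∧
          (∀ i p v, (l.foldl (fun (s : Int × PySem.Dict (Int × Int) Int) take =>
              (max s.1 (PySem.List.pyGetD (PySem.List.pyGetD pref (n : Int) []) (take - 1) 0 +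
                 (pvBest pref nc n (plates - take) s.2).1),
               (pvBest pref nc n (plates - take) s.2).2)) s).2.get? (i, p) = some v →
            v = pvF pref nc i.toNat p) := by
        intro l
        induction l with
        | nil => intro s hs; exact ⟨rfl, hs⟩
        | cons t ts iht =>
          intro s hs
          obtain ⟨w1, w2⟩ := ih (plates - t) s.2 hs
          simp only [List.foldl_cons, w1]
          exact iht _ w2
      obtain ⟨h01, h02⟩ := ih plates memo hm
      obtain ⟨hf1, hf2⟩ := hfold (PySem.List.pyRange 1 (min plates nc + 1) 1)
        (pvBest pref nc n plates memo) h02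
      constructor
      · rw [hf1, h01]
        simp [pvF]
      · intro i p v hv
        simp only [PySem.Dict.get?_insert] at hv
        split at hv
        · rename_i heq
          obtain ⟨hi, hp⟩ := Prod.mk.injEq .. ▸ heq
          cases hv
          rw [hf1, h01]
          have : i.toNat = n + 1 := by rw [Prod.ext_iff] at heq; simp at heq; omega
          rw [this]
          simp [pvF, Prod.ext_iff] at heq ⊢
          rw [heq.2]
        · exact hf2 i p v hv

-- row i of the finished part of A's table / the all-zero row
def pvRowL (pref : List (List Int)) (nc k : Int) (i : Nat) : List Int :=
  (PySem.List.pyRange 0 (k + 1) 1).map (fun p => pvF pref nc i p)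

def pvZRow (k : Int) : List Int :=
  (PySem.List.pyRange 0 (k + 1) 1).map (fun _ => (0 : Int))

theorem pvRowL_zero (pref : List (List Int)) (nc k : Int) :
    pvRowL pref nc k 0 = pvZRow k := by
  simp [pvRowL, pvZRow, pvF]

-- the take-fold computes the recurrence, reading row r of the finished part
theorem pvCell (pref : List (List Int)) (nc k : Int) (r : Nat) (p : Int)
    (hp : 0 ≤ p) (hpk : p ≤ k) :
    (PySem.List.pyRange 1 (min p nc + 1) 1).foldl
      (fun c take =>
        max c (PySem.List.pyGetD (PySem.List.pyGetD pref (r : Int) []) (take - 1) 0 +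
               PySem.List.pyGetD (pvRowL pref nc k r) (p - take) 0))
      (PySem.List.pyGetD (pvRowL pref nc k r) p 0)
      = pvF pref nc (r + 1) p := by
  unfold pvRowL
  rw [PySem.List.pyGetD_map_pyRange_of_nonneg _ _ _ _ hp (by omega)]
  rw [PySem.List.foldl_congr_mem _ _
    (fun c take =>
      max c (PySem.List.pyGetD (PySem.List.pyGetD pref (r : Int) []) (take - 1) 0 +
             pvF pref nc r (p - take))) _ ?_]
  · simp [pvF]
  · intro acc x hx
    have hmem := PySem.List.mem_pyRange_one.mp hx
    rw [PySem.List.pyGetD_map_pyRange_of_nonneg _ _ _ _ (by omega) (by omega)]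

-- one outer step: processing row r+1 turns the zero row after the finished part into row r+1
theorem pvRowStep (pref : List (List Int)) (nc k : Int) (hk : 0 ≤ k) (r : Nat)
    (rest : List (List Int)) :
    (PySem.List.pyRange 0 (k + 1) 1).foldl (fun dp plates =>
        PySem.List.pySetD dp ((r : Int) + 1)
          (PySem.List.pySetD (PySem.List.pyGetD dp ((r : Int) + 1) []) plates
            ((PySem.List.pyRange 1 (min plates nc + 1) 1).foldl
              (fun c take =>
                max c (PySem.List.pyGetD (PySem.List.pyGetD pref ((r : Int) + 1 - 1) []) (take - 1) 0 +
                       PySem.List.pyGetD (PySem.List.pyGetD dp ((r : Int) + 1 - 1) []) (plates - take) 0))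
              (PySem.List.pyGetD (PySem.List.pyGetD dp ((r : Int) + 1 - 1) []) plates 0))))
      ((List.range (r + 1)).map (pvRowL pref nc k) ++ pvZRow k :: rest)
      = (List.range (r + 1)).map (pvRowL pref nc k) ++ pvRowL pref nc k (r + 1) :: rest := by
  have hzlen : (pvZRow k).length = k.toNat + 1 := by
    simp [pvZRow, PySem.List.length_pyRange_one]; omega
  have hprelen : ((List.range (r + 1)).map (pvRowL pref nc k)).length = r + 1 := by simp
  have key : ∀ p : Nat, p ≤ k.toNat + 1 →
      (PySem.List.pyRange 0 (p : Int) 1).foldl (fun dp plates =>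
        PySem.List.pySetD dp ((r : Int) + 1)
          (PySem.List.pySetD (PySem.List.pyGetD dp ((r : Int) + 1) []) plates
            ((PySem.List.pyRange 1 (min plates nc + 1) 1).foldl
              (fun c take =>
                max c (PySem.List.pyGetD (PySem.List.pyGetD pref ((r : Int) + 1 - 1) []) (take - 1) 0 +
                       PySem.List.pyGetD (PySem.List.pyGetD dp ((r : Int) + 1 - 1) []) (plates - take) 0))
              (PySem.List.pyGetD (PySem.List.pyGetD dp ((r : Int) + 1 - 1) []) plates 0))))
        ((List.range (r + 1)).map (pvRowL pref nc k) ++ pvZRow k :: rest)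
      = (List.range (r + 1)).map (pvRowL pref nc k) ++
          ((PySem.List.pyRange 0 (p : Int) 1).map (fun q => pvF pref nc (r + 1) q) ++
            (pvZRow k).drop p) :: rest := by
    intro p
    induction p with
    | zero => intro _; simp [PySem.List.pyRange_one_eq_nil]
    | succ m ihm =>
      intro hm
      have hcast : ((m + 1 : Nat) : Int) = (m : Int) + 1 := by push_cast; ring
      rw [hcast, PySem.List.pyRange_one_succ_right (by positivity), List.foldl_append,
        ihm (by omega), List.map_append, List.foldl_cons, List.foldl_nil]
      have hmk : (m : Int) ≤ k := by omega
      set mid := (PySem.List.pyRange 0 (m : Int) 1).map (fun q => pvF pref nc (r + 1) q) with hmid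
      have hmidlen : mid.length = m := by
        simp [hmid, PySem.List.length_pyRange_one]
      have hsub : (r : Int) + 1 - 1 = ((r : Nat) : Int) := by ring
      simp only [hsub]
      -- reading row r (the last finished row)
      have hrowr : PySem.List.pyGetD ((List.range (r + 1)).map (pvRowL pref nc k) ++
          (mid ++ (pvZRow k).drop m) :: rest) ((r : Nat) : Int) [] = pvRowL pref nc k r := by
        rw [PySem.List.pyGetD_natCast, List.getD_append _ _ _ _ (by simp),
          List.getD_eq_getElem _ _ (by simp), List.getElem_map, List.getElem_range]
      -- reading row r+1 (the row being written)
      have hrow1 : PySem.List.pyGetD ((List.range (r + 1)).map (pvRowL pref nc k) ++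
          (mid ++ (pvZRow k).drop m) :: rest) ((r : Int) + 1) [] = mid ++ (pvZRow k).drop m := by
        have : (r : Int) + 1 = ((r + 1 : Nat) : Int) := by push_cast; ring
        rw [this, PySem.List.pyGetD_natCast,
          List.getD_append_right _ _ _ _ (by simp), List.getD_eq_getElem _ _ (by simp)]
        simp
      rw [hrowr, hrow1]
      rw [pvCell pref nc k r (m : Int) (by positivity) hmk]
      -- write the cell into the row
      have hdropm : (pvZRow k).drop m = 0 :: (pvZRow k).drop (m + 1) := by
        rw [List.drop_eq_getElem_cons (by omega)]
        simp [pvZRow]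
      rw [PySem.List.pySetD_natCast, hdropm, List.set_append, if_neg (by omega)]
      have hzero : m - mid.length = 0 := by omega
      rw [hzero, List.set_cons_zero]
      -- write the row into the table
      have : (r : Int) + 1 = ((r + 1 : Nat) : Int) := by push_cast; ring
      rw [this, PySem.List.pySetD_natCast, List.set_append, if_neg (by simp)]
      simp
  have hfin := key (k.toNat + 1) le_rfl
  have hcast : ((k.toNat + 1 : Nat) : Int) = k + 1 := by omega
  rw [hcast] at hfin
  rw [hfin, List.drop_of_length_le (by omega)]
  simp [pvRowL]

-- the whole outer fold: after t rows, rows 0..t are finished and the rest are zero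
theorem pvTable (pref : List (List Int)) (nc k : Int) (hk : 0 ≤ k) (nr : Nat) (t : Nat)
    (ht : t ≤ nr) :
    (PySem.List.pyRange 1 ((t : Int) + 1) 1).foldl (fun dp row =>
        (PySem.List.pyRange 0 (k + 1) 1).foldl (fun dp plates =>
          PySem.List.pySetD dp row
            (PySem.List.pySetD (PySem.List.pyGetD dp row []) plates
              ((PySem.List.pyRange 1 (min plates nc + 1) 1).foldl
                (fun c take =>
                  max c (PySem.List.pyGetD (PySem.List.pyGetD pref (row - 1) []) (take - 1) 0 +
                         PySem.List.pyGetD (PySem.List.pyGetD dp (row - 1) []) (plates - take) 0))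
                (PySem.List.pyGetD (PySem.List.pyGetD dp (row - 1) []) plates 0)))) dp)
      (List.replicate (nr + 1) (pvZRow k))
      = (List.range (t + 1)).map (pvRowL pref nc k) ++ List.replicate (nr - t) (pvZRow k) := by
  induction t with
  | zero =>
    simp [PySem.List.pyRange_one_eq_nil, pvRowL_zero]
    cases nr <;> simp [List.replicate_succ]
  | succ u ihu =>
    have hcast : ((u + 1 : Nat) : Int) + 1 = ((u : Int) + 1) + 1 := by push_cast; ring
    rw [hcast, PySem.List.pyRange_one_succ_right (a := 1) (b := (u : Int) + 1) (by omega),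
      List.foldl_append, ihu (by omega), List.foldl_cons, List.foldl_nil]
    have hrep : List.replicate (nr - u) (pvZRow k) = pvZRow k :: List.replicate (nr - (u + 1)) (pvZRow k) := by
      have : nr - u = (nr - (u + 1)) + 1 := by omega
      rw [this, List.replicate_succ]
    rw [hrep, pvRowStep pref nc k hk u]
    rw [List.range_succ (n := u + 1), List.map_append]
    simp

-- the A-side table computes pvF
theorem solve_tabulation_eq_pvF (arr : List (List Int)) (k : Int)
    (hk : 0 ≤ k) :
    solve_tabulation arr k
      = pvF (arr.map pvPrefRowA) (PySem.List.len ((PySem.List.pyGet? arr 0).getD [])) arr.length k := by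
  unfold solve_tabulation
  simp only [PySem.List.len_eq]
  have hdp0 : (PySem.List.pyRange 0 ((arr.length : Int) + 1) 1).map
      (fun _ => (PySem.List.pyRange 0 (k + 1) 1).map (fun _ => (0 : Int)))
      = List.replicate (arr.length + 1) (pvZRow k) := by
    rw [List.map_const']
    congr 1
    rw [PySem.List.length_pyRange_one]
    omega
  rw [hdp0,
    pvTable (arr.map pvPrefRowA) (((PySem.List.pyGet? arr 0).getD []).length : Int) k hk
      arr.length arr.length le_rfl]
  rw [Nat.sub_self, List.replicate_zero, List.append_nil, List.range_succ, List.map_append]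
  simp only [List.map_cons, List.map_nil]
  rw [PySem.List.pyGetD_neg_one_append_singleton]
  unfold pvRowL
  rw [PySem.List.pyRange_one_succ_right (a := 0) (b := k) hk,
    List.map_append]
  simp only [List.map_cons, List.map_nil]
  rw [PySem.List.pyGetD_neg_one_append_singleton]

-- ===== VERDICT (by name: the statement is the Claim_ definition above) =====
theorem solve_tabulation_spec : Claim_equal_solve_tabulation := by
  intro arr k _hdom hpre
  obtain ⟨-, hk, -⟩ := hpre
  unfold Spec_solve_tabulation
  rw [solve_tabulation_eq_pvF arr k hk]
  have hpref : arr.map pvPrefRowA = arr.map pvPrefRowB := by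
    simp [pvPrefRowA_eq_scan, pvPrefRowB_eq_scan]
  rw [hpref]
  have := (pvBest_correct (arr.map pvPrefRowB)
      (PySem.List.len ((PySem.List.pyGet? arr 0).getD [])) arr.length k PySem.Dict.empty
      (by intro i p v h; simp [PySem.Dict.get?_empty] at h)).1
  simp only [solve_tabulation_alt]
  simp only [PySem.List.len_eq] at this ⊢
  exact this.symm
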